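-- pv_equiv track=rewrite | github.com/KMUsungwon/Algorithm | programmers/LV2/더 맵게/solution.py | solution
-- ===== SOURCE A (Python) =====
-- import heapq
--
-- def solution(scoville, K):
--     h = []
--     answer = 0
--
--     for i in scoville:
--         heapq.heappush(h, i)
--
--     while h[0] < K:
--         try:
--             a = heapq.heappop(h)
--             b = heapq.heappop(h)
--             mix = a + (b*2)
--             heapq.heappush(h, mix)
--             answer += 1
--         except:
--             return -1
--     return answer
-- ===== SOURCE B (Python) =====
-- def solution(scoville, K):
--     # keep the pot as a list maintained in ascending order: the two mildest are
--     # always at the front; the mix is put back by ordered insertion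
--     lst = sorted(scoville)
--     answer = 0
--     while lst[0] < K:
--         if len(lst) < 2:
--             return -1
--         a = lst.pop(0)
--         b = lst.pop(0)
--         mix = a + b * 2
--         pos = 0
--         while pos < len(lst) and lst[pos] <= mix:
--             pos += 1
--         lst.insert(pos, mix)
--         answer += 1
--     return answer
-- ===== Notes on version B (the rewrite author's own statement) =====
-- stated objective: alternative
-- what changed: Replaces the binary heap with a plain list kept in ascending order: sort once, pop the two mildest from the front, and put the mix back by ordered insertion; the missing-second-element case is an explicit length check instead of try/except around heappop.
import Mathlib
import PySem

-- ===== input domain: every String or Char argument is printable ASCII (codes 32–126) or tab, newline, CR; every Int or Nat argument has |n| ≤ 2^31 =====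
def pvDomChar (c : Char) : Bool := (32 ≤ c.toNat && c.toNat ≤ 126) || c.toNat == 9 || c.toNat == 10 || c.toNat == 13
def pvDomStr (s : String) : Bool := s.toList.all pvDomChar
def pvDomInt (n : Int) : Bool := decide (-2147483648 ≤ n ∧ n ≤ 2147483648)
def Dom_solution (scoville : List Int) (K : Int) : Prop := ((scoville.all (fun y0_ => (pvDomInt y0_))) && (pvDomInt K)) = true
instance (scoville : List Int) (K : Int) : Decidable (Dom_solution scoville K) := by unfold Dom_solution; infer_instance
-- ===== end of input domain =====

-- B replaces the heap by a list kept in ascending order (sort once, pop two from the front,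
-- reinsert the mix in order): a different data structure of similar cost (objective: alternative).

-- ===== PORT A =====
-- heapq.heappush/heappop are stdlib calls with no PySem primitive; they are ported by hand as a
-- purely functional min-heap (skew heap).  This is exact at A's call sites: heappush inserts an
-- element, heappop removes and returns the minimum (raising = none on an empty heap), h[0] reads
-- the minimum — which is everything A observes of the heap.
inductive PyHeap : Type
  | nil : PyHeap
  | node : Int → PyHeap → PyHeap → PyHeap
deriving DecidableEq, Repr

def PyHeap.size : PyHeap → Nat
  | .nil => 0
  | .node _ l r => l.size + r.size + 1

def heapMerge : PyHeap → PyHeap → PyHeap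
  | .nil, t => t
  | .node x l r, .nil => .node x l r
  | .node x l r, .node y l2 r2 =>
    if x ≤ y then .node x (heapMerge r (.node y l2 r2)) l
    else .node y (heapMerge (.node x l r) r2) l2
termination_by s t => s.size + t.size
decreasing_by
  all_goals (simp [PyHeap.size]; try omega)

def heapPush (h : PyHeap) (x : Int) : PyHeap := heapMerge h (.node x .nil .nil)

def heapMin? : PyHeap → Option Int
  | .nil => none
  | .node x _ _ => some x

def heapPop? : PyHeap → Option (Int × PyHeap)
  | .nil => none
  | .node x l r => some (x, heapMerge l r)

-- the 'while h[0] < K' loop; fuel = initial number of elements (each iteration removes one)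
def solutionLoop (K : Int) : Nat → PyHeap → Int → Int
  | 0, _, answer => answer
  | fuel + 1, h, answer =>
    match heapMin? h with
    | none => 0            -- h[0] on an empty heap raises IndexError; Pre_solution excludes this
    | some m =>
      if m < K then
        match heapPop? h with
        | none => -1
        | some (a, h1) =>
          match heapPop? h1 with
          | none => -1     -- second heappop raises on the emptied heap: except → return -1
          | some (b, h2) => solutionLoop K fuel (heapPush h2 (a + b * 2)) (answer + 1)
      else answer

def solution (scoville : List Int) (K : Int) : Int :=
  solutionLoop K scoville.length (scoville.foldl heapPush .nil) 0

-- ===== PORT B =====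
-- the inner 'while pos < len(lst) and lst[pos] <= mix: pos += 1; lst.insert(pos, mix)' scan
def insLin (mix : Int) : List Int → List Int
  | [] => [mix]
  | y :: ys => if y ≤ mix then y :: insLin mix ys else mix :: y :: ys

def solutionAltLoop (K : Int) : Nat → List Int → Int → Int
  | 0, _, answer => answer
  | fuel + 1, lst, answer =>
    match lst with
    | [] => 0              -- lst[0] raises IndexError; Pre_solution excludes this
    | a :: rest =>
      if a < K then
        match rest with
        | [] => -1         -- len(lst) < 2
        | b :: rest2 => solutionAltLoop K fuel (insLin (a + b * 2) rest2) (answer + 1)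
      else answer

def solution_alt (scoville : List Int) (K : Int) : Int :=
  solutionAltLoop K scoville.length (PySem.List.sorted scoville (fun x => x) false) 0

-- ===== PRECONDITION & SPEC =====
-- Pre_ excludes only the empty list, on which both A and B raise IndexError at the first lst[0]/h[0].
def Pre_solution (scoville : List Int) (K : Int) : Prop := scoville ≠ []
instance (scoville : List Int) (K : Int) : Decidable (Pre_solution scoville K) := by unfold Pre_solution; infer_instance
def pvWitness_solution : List Int × Int := ([1, 2, 3, 9, 10, 12], 7)

def Spec_solution (scoville : List Int) (K : Int) (out : Int) : Prop := out = solution_alt scoville K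
instance (scoville : List Int) (K : Int) (out : Int) : Decidable (Spec_solution scoville K out) := by unfold Spec_solution; infer_instance

-- ===== CLAIM (what is proved, stated in full; the proofs are below) =====
def Claim_equal_solution : Prop := ∀ (scoville : List Int) (K : Int), Dom_solution scoville K → Pre_solution scoville K → Spec_solution scoville K (solution scoville K)

-- ===== LEMMAS AND PROOFS =====

def heapMS : PyHeap → Multiset Int
  | .nil => 0
  | .node x l r => x ::ₘ (heapMS l + heapMS r)

def HeapOK : PyHeap → Prop
  | .nil => True
  | .node x l r => HeapOK l ∧ HeapOK r ∧ (∀ z ∈ heapMS l, x ≤ z) ∧ (∀ z ∈ heapMS r, x ≤ z)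

lemma root_le {x : Int} {l r : PyHeap} (h : HeapOK (.node x l r)) :
    ∀ z ∈ heapMS (.node x l r), x ≤ z := by
  intro z hz
  simp only [heapMS, Multiset.mem_cons, Multiset.mem_add] at hz
  rcases hz with rfl | hz | hz
  · exact le_refl z
  · exact h.2.2.1 z hz
  · exact h.2.2.2 z hz

lemma heapMS_merge (s t : PyHeap) : heapMS (heapMerge s t) = heapMS s + heapMS t := by
  fun_induction heapMerge s t with
  | case1 t => simp [heapMS]
  | case2 x l r => simp [heapMS]
  | case3 x l r y l2 r2 hxy ih =>
      simp only [heapMS, ih, ← Multiset.singleton_add]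
      abel
  | case4 x l r y l2 r2 hxy ih =>
      simp only [heapMS, ih, ← Multiset.singleton_add]
      abel

lemma heapOK_merge (s t : PyHeap) (hs : HeapOK s) (ht : HeapOK t) : HeapOK (heapMerge s t) := by
  fun_induction heapMerge s t with
  | case1 t => exact ht
  | case2 x l r => exact hs
  | case3 x l r y l2 r2 hxy ih =>
      refine ⟨ih hs.2.1 ht, hs.1, ?_, hs.2.2.1⟩
      intro z hz
      rw [heapMS_merge] at hz
      rcases Multiset.mem_add.mp hz with hz | hz
      · exact hs.2.2.2 z hz
      · exact le_trans hxy (root_le ht z hz)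
  | case4 x l r y l2 r2 hxy ih =>
      refine ⟨ih hs ht.2.1, ht.1, ?_, ht.2.2.1⟩
      intro z hz
      rw [heapMS_merge] at hz
      rcases Multiset.mem_add.mp hz with hz | hz
      · exact le_trans (by omega) (root_le hs z hz)
      · exact ht.2.2.2 z hz

lemma heapMS_eq_zero {t : PyHeap} (h : heapMS t = 0) : t = .nil := by
  cases t with
  | nil => rfl
  | node x l r => simp [heapMS] at h

lemma heapMS_push (t : PyHeap) (v : Int) : heapMS (heapPush t v) = v ::ₘ heapMS t := by
  rw [heapPush, heapMS_merge]
  simp only [heapMS, ← Multiset.singleton_add]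
  abel

lemma heapOK_push (t : PyHeap) (v : Int) (ht : HeapOK t) : HeapOK (heapPush t v) := by
  refine heapOK_merge _ _ ht ?_
  refine ⟨trivial, trivial, ?_, ?_⟩ <;> intro z hz <;> simp [heapMS] at hz

lemma foldl_push_MS (xs : List Int) (t : PyHeap) :
    heapMS (xs.foldl heapPush t) = heapMS t + ↑xs := by
  induction xs generalizing t with
  | nil => simp
  | cons x xs ih =>
      simp only [List.foldl_cons, ih, heapMS_push, ← Multiset.cons_coe,
        ← Multiset.singleton_add]
      abel

lemma foldl_push_OK (xs : List Int) (t : PyHeap) (ht : HeapOK t) :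
    HeapOK (xs.foldl heapPush t) := by
  induction xs generalizing t with
  | nil => exact ht
  | cons x xs ih => exact ih _ (heapOK_push t x ht)

lemma insLin_perm (mix : Int) (l : List Int) : (insLin mix l).Perm (mix :: l) := by
  induction l with
  | nil => simp [insLin]
  | cons y ys ih =>
      simp only [insLin]
      split
      · exact ((ih.cons y).trans (List.Perm.swap mix y ys))
      · exact List.Perm.refl _

lemma insLin_mem {z mix : Int} {l : List Int} (hz : z ∈ insLin mix l) : z = mix ∨ z ∈ l := by
  have := (insLin_perm mix l).mem_iff.mp hz
  simpa using this

lemma insLin_pairwise (mix : Int) (l : List Int) (h : l.Pairwise (· ≤ ·)) :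
    (insLin mix l).Pairwise (· ≤ ·) := by
  induction l with
  | nil => simp [insLin]
  | cons y ys ih =>
      rcases List.pairwise_cons.mp h with ⟨hy, hys⟩
      simp only [insLin]
      split
      · rename_i hle
        refine List.pairwise_cons.mpr ⟨?_, ih hys⟩
        intro z hz
        rcases insLin_mem hz with rfl | hz
        · exact hle
        · exact hy z hz
      · rename_i hlt
        refine List.pairwise_cons.mpr ⟨?_, h⟩
        intro z hz
        rcases List.mem_cons.mp hz with rfl | hz
        · omega
        · exact le_trans (by omega) (hy z hz)

lemma insLin_coe (mix : Int) (l : List Int) :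
    ((insLin mix l : List Int) : Multiset Int) = mix ::ₘ ↑l :=
  Multiset.coe_eq_coe.mpr (insLin_perm mix l)

-- the joint simulation: a heap and a sorted list holding the same multiset run the two loops
-- to the same answer
lemma loop_eq (K : Int) : ∀ (fuel : Nat) (h : PyHeap) (lst : List Int) (answer : Int),
    HeapOK h → lst.Pairwise (· ≤ ·) → heapMS h = ↑lst →
    solutionLoop K fuel h answer = solutionAltLoop K fuel lst answer := by
  intro fuel
  induction fuel with
  | zero => intro h lst answer _ _ _; rfl
  | succ fuel ih =>
      intro h lst answer hOK hsorted hms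
      cases h with
      | nil =>
          cases lst with
          | nil => rfl
          | cons c cs =>
              exfalso
              have h1 : (c ::ₘ (↑cs : Multiset Int)) = 0 := by
                rw [Multiset.cons_coe]; exact hms.symm
              exact Multiset.cons_ne_zero h1
      | node x l r =>
          cases lst with
          | nil =>
              exfalso
              have h0 : heapMS (.node x l r) = 0 := by rw [hms]; rfl
              simp [heapMS] at h0
          | cons a rest =>
              -- the heap root equals the sorted head
              have hxmem : x ∈ (↑(a :: rest) : Multiset Int) := by
                rw [← hms]; simp [heapMS]
              have hamem : a ∈ heapMS (.node x l r) := by rw [hms]; simp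
              have hax : a ≤ x := by
                rcases List.mem_cons.mp (by exact_mod_cast hxmem) with rfl | hx
                · exact le_refl _
                · exact (List.pairwise_cons.mp hsorted).1 x hx
              have hxa : x ≤ a := root_le hOK a hamem
              obtain rfl : x = a := le_antisymm hxa hax
              have hrest : heapMS l + heapMS r = (↑rest : Multiset Int) := by
                apply (Multiset.cons_inj_right x).mp
                have h1 := hms
                rw [show heapMS (.node x l r) = x ::ₘ (heapMS l + heapMS r) from rfl] at h1
                simpa using h1
              simp only [solutionLoop, solutionAltLoop, heapMin?]
              by_cases hK : x < K
              · simp only [if_pos hK, heapPop?]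
                have hOKm : HeapOK (heapMerge l r) := heapOK_merge l r hOK.1 hOK.2.1
                have hmsm : heapMS (heapMerge l r) = (↑rest : Multiset Int) := by
                  rw [heapMS_merge]; exact hrest
                cases rest with
                | nil =>
                    have hnil : heapMerge l r = .nil := heapMS_eq_zero (by rw [hmsm]; rfl)
                    rw [hnil]
                | cons b rest2 =>
                    cases hm : heapMerge l r with
                    | nil =>
                        exfalso
                        rw [hm] at hmsm
                        have h1 : (b ::ₘ (↑rest2 : Multiset Int)) = 0 := by
                          rw [Multiset.cons_coe]; exact hmsm.symm
                        exact Multiset.cons_ne_zero h1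
                    | node y l2 r2 =>
                        rw [hm] at hOKm hmsm
                        have hsrest : (b :: rest2).Pairwise (· ≤ ·) :=
                          (List.pairwise_cons.mp hsorted).2
                        -- the second pop equals the second sorted element
                        have hymem : y ∈ (↑(b :: rest2) : Multiset Int) := by
                          rw [← hmsm]; simp [heapMS]
                        have hbmem : b ∈ heapMS (.node y l2 r2) := by rw [hmsm]; simp
                        have hby : b ≤ y := by
                          rcases List.mem_cons.mp (by exact_mod_cast hymem) with rfl | hy
                          · exact le_refl _
                          · exact (List.pairwise_cons.mp hsrest).1 y hy
                        have hyb : y ≤ b := root_le hOKm b hbmem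
                        obtain rfl : y = b := le_antisymm hyb hby
                        have hrest2 : heapMS l2 + heapMS r2 = (↑rest2 : Multiset Int) := by
                          apply (Multiset.cons_inj_right y).mp
                          have h2 := hmsm
                          rw [show heapMS (.node y l2 r2) = y ::ₘ (heapMS l2 + heapMS r2) from rfl] at h2
                          simpa using h2
                        show solutionLoop K fuel (heapPush (heapMerge l2 r2) (x + y * 2)) (answer + 1) =
                             solutionAltLoop K fuel (insLin (x + y * 2) rest2) (answer + 1)
                        apply ih
                        · exact heapOK_push _ _ (heapOK_merge l2 r2 hOKm.1 hOKm.2.1)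
                        · exact insLin_pairwise _ _ (List.pairwise_cons.mp hsrest).2
                        · rw [heapMS_push, heapMS_merge, hrest2, insLin_coe]
              · simp only [if_neg hK]

-- ===== VERDICT (by name: the statement is the Claim_ definition above) =====
theorem solution_spec : Claim_equal_solution := by
  intro scoville K _hdom _hpre
  unfold Spec_solution solution solution_alt
  apply loop_eq
  · exact foldl_push_OK scoville .nil trivial
  · have hp := PySem.List.sorted_pairwise (xs := scoville) (key := fun x => x)
    simpa using hp
  · rw [foldl_push_MS]
    have hcoe : ((PySem.List.sorted scoville (fun x => x) false : List Int) : Multiset Int) = ↑scoville :=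
      Multiset.coe_eq_coe.mpr (PySem.List.sorted_perm scoville (fun x => x) false)
    rw [hcoe]
    rfl
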